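-- pv_equiv track=rewrite | github.com/dmitridzuk/first_class | python/newbie_py/lab4/4.py | check
-- ===== SOURCE A (Python) =====
-- def check(a):
--     s = a.split()
--     l = {}
--     m = []
--     for i in s:
--         if i in l:
--             l[i] += 1
--         else:
--             l[i] = 0
--         m.append(l[i])
--     return m
-- ===== SOURCE B (Python) =====
-- def check(a):
--     s = a.split()
--     return [s[:i].count(w) for i, w in enumerate(s)]
-- ===== Notes on version B (the rewrite author's own statement) =====
-- stated objective: simpler
-- what changed: Replaces A's incrementally maintained dict of running counts with a one-line comprehension that, for each position i, counts the word in the prefix slice s[:i].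
import Mathlib
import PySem

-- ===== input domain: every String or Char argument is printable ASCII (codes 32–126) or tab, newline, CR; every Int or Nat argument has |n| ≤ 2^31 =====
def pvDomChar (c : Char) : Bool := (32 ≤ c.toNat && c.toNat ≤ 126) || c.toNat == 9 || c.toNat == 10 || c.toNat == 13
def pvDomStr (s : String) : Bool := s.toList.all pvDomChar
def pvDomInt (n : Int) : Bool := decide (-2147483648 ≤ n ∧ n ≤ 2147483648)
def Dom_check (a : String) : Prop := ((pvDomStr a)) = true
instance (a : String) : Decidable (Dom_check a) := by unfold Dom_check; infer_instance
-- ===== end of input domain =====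

-- B replaces A's incrementally maintained dict of running counts with a comprehension
-- counting each word in the prefix slice before its position (simpler, not faster).

-- ===== PORT A =====
def check (a : String) : List Int :=
  let s := PySem.Str.split₀ a
  (s.foldl (fun (st : PySem.Dict String Int × List Int) i =>
      let l := if st.1.contains i then st.1.insert i (st.1.getD i 0 + 1)
               else st.1.insert i 0
      (l, st.2 ++ [l.getD i 0]))
    (PySem.Dict.empty, [])).2

-- ===== PORT B =====
def check_alt (a : String) : List Int :=
  let s := PySem.Str.split₀ a
  (PySem.List.enumerate s 0).map
    (fun iw => ((PySem.List.slice s none (some iw.1)).count iw.2 : Int))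

-- ===== PRECONDITION & SPEC =====
def Spec_check (a : String) (out : List Int) : Prop := out = check_alt a
instance (a : String) (out : List Int) : Decidable (Spec_check a out) := by unfold Spec_check; infer_instance

-- ===== CLAIM (what is proved, stated in full; the proofs are below) =====
def Claim_equal_check : Prop := ∀ (a : String), Dom_check a → Spec_check a (check a)

-- ===== LEMMAS AND PROOFS =====

-- the common value: running occurrence indices of `rest` given already-seen prefix `p`
def pvRun (p rest : List String) : List Int :=
  match rest with
  | [] => []
  | w :: r => (p.count w : Int) :: pvRun (p ++ [w]) r

lemma pvLoopA (rest : List String) : ∀ (p : List String) (d : PySem.Dict String Int) (m : List Int),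
    (∀ w, d.getD w (-1) = (p.count w : Int) - 1) →
    (rest.foldl (fun (st : PySem.Dict String Int × List Int) i =>
        let l := if st.1.contains i then st.1.insert i (st.1.getD i 0 + 1)
                 else st.1.insert i 0
        (l, st.2 ++ [l.getD i 0])) (d, m)).2 = m ++ pvRun p rest := by
  induction rest with
  | nil => intro p d m _; simp [pvRun]
  | cons w r ih =>
    intro p d m hd
    simp only [List.foldl_cons]
    have hval : (if d.contains w then d.insert w (d.getD w 0 + 1) else d.insert w 0)
        = d.insert w (p.count w : Int) := by
      by_cases hc : d.contains w = true
      · simp only [hc, if_true]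
        rcases h : d.get? w with _ | v
        · rw [PySem.Dict.contains_eq_isSome_get?, h] at hc; simp at hc
        · have h0 := PySem.Dict.getD_of_get?_eq_some (d := d) (d0 := (0:Int)) h
          have h1 := PySem.Dict.getD_of_get?_eq_some (d := d) (d0 := (-1:Int)) h
          rw [hd w] at h1
          rw [h0, show (p.count w : Int) = v + 1 by omega]
      · simp only [hc]
        have h1 := PySem.Dict.getD_of_not_contains (d := d) (k := w) (d0 := (-1:Int)) (by simpa using hc)
        rw [hd w] at h1
        rw [show ((p.count w : Nat) : Int) = 0 by omega]
        simp
    rw [hval]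
    have hinv : ∀ v, (d.insert w (p.count w : Int)).getD v (-1) = (((p ++ [w]).count v : Int)) - 1 := by
      intro v
      rw [PySem.Dict.getD_insert]
      by_cases hv : v = w
      · subst hv; simp [List.count_append]
      · rw [if_neg hv, hd v, List.count_append]
        have : List.count v [w] = 0 := by simp [Ne.symm hv]
        omega
    rw [ih (p ++ [w]) _ _ hinv]
    simp [pvRun]

lemma pvLoopB (rest : List String) : ∀ (p : List String),
    (PySem.List.enumerate rest (p.length : Int)).map
      (fun iw => (((PySem.List.slice (p ++ rest) none (some iw.1)).count iw.2 : Nat) : Int))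
    = pvRun p rest := by
  induction rest with
  | nil => intro p; simp [PySem.List.enumerate_nil, pvRun]
  | cons w r ih =>
    intro p
    rw [PySem.List.enumerate_cons]
    simp only [List.map_cons, pvRun]
    have hhd : (List.count w (PySem.List.slice (p ++ w :: r) none (some (p.length : Int))) : Int)
        = (p.count w : Int) := by
      rw [PySem.List.slice_to_natCast]
      simp
    rw [hhd]
    have h2 : p ++ w :: r = (p ++ [w]) ++ r := by simp
    have h1 : ((p.length : Int) + 1) = (((p ++ [w]).length : Nat) : Int) := by simp
    rw [h2, h1, ih (p ++ [w])]

-- ===== VERDICT (by name: the statement is the Claim_ definition above) =====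
theorem check_spec : Claim_equal_check := by
  intro a _
  unfold Spec_check check check_alt
  rw [pvLoopA (PySem.Str.split₀ a) [] PySem.Dict.empty []
      (by intro w; simp [PySem.Dict.getD_empty])]
  rw [List.nil_append]
  have := pvLoopB (PySem.Str.split₀ a) []
  simpa using this.symm
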